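-- pv_equiv track=rewrite | github.com/albauer-priv/RPS | src/rps/agents/knowledge_injection.py | _extract_season_section
-- ===== SOURCE A (Python) =====
-- _LOAD_SPEC_HEADINGS = {
--     "terminology": "## 1) Terminology and Governance Semantics (Binding)",
--     "required_inputs": "## 2) Required Inputs (Binding)",
--     "per_workout": "## 3) Per-Workout Load Estimation (Binding)",
--     "weekly_corridor": "## 4) Weekly Corridor Derivation (Phase-Architect) (Binding)",
--     "planner_responsibilities": "## 5) Planner Responsibilities (Binding)",
--     "season_responsibilities": "### 5.1 Season-Planner",
--     "phase_responsibilities": "### 5.2 Phase-Architect",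
--     "week_responsibilities": "### 5.3 Week-Planner",
--     "end": "## End of LoadEstimationSpec v2.0",
-- }
--
-- def _find_heading(lines: list[str], heading: str) -> int | None:
--     """Return the first line index matching a heading exactly."""
--     for idx, line in enumerate(lines):
--         if line.strip() == heading:
--             return idx
--     return None
--
-- def _slice_by_indices(lines: list[str], start: int | None, end: int | None) -> str:
--     """Return a trimmed text slice for the given line boundaries."""
--     if start is None:
--         return ""
--     end_idx = len(lines) if end is None else end
--     return "\n".join(lines[start:end_idx]).rstrip()
--
-- def _load_spec_prelude(lines: list[str]) -> str:
--     """Return the prelude before the first numbered section."""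
--     first_section = _find_heading(lines, _LOAD_SPEC_HEADINGS["terminology"])
--     if first_section is None:
--         return "\n".join(lines).rstrip()
--     return "\n".join(lines[:first_section]).rstrip()
--
-- def _extract_season_section(spec_text: str) -> str:
--     """Return the shared prelude plus season-planner-relevant sections."""
--     lines = spec_text.splitlines()
--     prelude = _load_spec_prelude(lines)
--     terminology = _slice_by_indices(
--         lines,
--         _find_heading(lines, _LOAD_SPEC_HEADINGS["terminology"]),
--         _find_heading(lines, _LOAD_SPEC_HEADINGS["required_inputs"]),
--     )
--     required_inputs = _slice_by_indices(
--         lines,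
--         _find_heading(lines, _LOAD_SPEC_HEADINGS["required_inputs"]),
--         _find_heading(lines, _LOAD_SPEC_HEADINGS["per_workout"]),
--     )
--     per_workout = _slice_by_indices(
--         lines,
--         _find_heading(lines, _LOAD_SPEC_HEADINGS["per_workout"]),
--         _find_heading(lines, _LOAD_SPEC_HEADINGS["weekly_corridor"]),
--     )
--     season_responsibilities = _slice_by_indices(
--         lines,
--         _find_heading(lines, _LOAD_SPEC_HEADINGS["season_responsibilities"]),
--         _find_heading(lines, _LOAD_SPEC_HEADINGS["phase_responsibilities"])
--         or _find_heading(lines, _LOAD_SPEC_HEADINGS["end"]),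
--     )
--     blocks = [
--         block
--         for block in (
--             prelude,
--             terminology,
--             required_inputs,
--             per_workout,
--             season_responsibilities,
--         )
--         if block
--     ]
--     return "\n\n".join(blocks).strip()
-- ===== SOURCE B (Python) =====
-- _LOAD_SPEC_HEADINGS = {
--     "terminology": "## 1) Terminology and Governance Semantics (Binding)",
--     "required_inputs": "## 2) Required Inputs (Binding)",
--     "per_workout": "## 3) Per-Workout Load Estimation (Binding)",
--     "weekly_corridor": "## 4) Weekly Corridor Derivation (Phase-Architect) (Binding)",
--     "planner_responsibilities": "## 5) Planner Responsibilities (Binding)",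
--     "season_responsibilities": "### 5.1 Season-Planner",
--     "phase_responsibilities": "### 5.2 Phase-Architect",
--     "week_responsibilities": "### 5.3 Week-Planner",
--     "end": "## End of LoadEstimationSpec v2.0",
-- }
--
--
-- def _extract_season_section(spec_text: str) -> str:
--     """Single streaming pass: a two-track state machine routes each line into its
--     bucket as it is read (no index search, no slicing)."""
--     H = _LOAD_SPEC_HEADINGS
--     buckets = [[], [], [], [], []]  # prelude, terminology, required_inputs, per_workout, season
--     mode = 0    # numbered track: 0..3 = collecting bucket, 4 = past weekly-corridor
--     season = 0  # season track: 0 = before 5.1, 1 = collecting, 2 = closed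
--     for line in spec_text.splitlines():
--         s = line.strip()
--         if mode == 0 and s == H["terminology"]:
--             mode = 1
--         elif mode == 1 and s == H["required_inputs"]:
--             mode = 2
--         elif mode == 2 and s == H["per_workout"]:
--             mode = 3
--         elif mode == 3 and s == H["weekly_corridor"]:
--             mode = 4
--         if season == 0 and s == H["season_responsibilities"]:
--             season = 1
--         elif season == 1 and (s == H["phase_responsibilities"] or s == H["end"]):
--             season = 2
--         if mode < 4:
--             buckets[mode].append(line)
--         if season == 1:
--             buckets[4].append(line)
--     blocks = ["\n".join(b).rstrip() for b in buckets]
--     return "\n\n".join(b for b in blocks if b).strip()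
-- ===== Notes on version B (the rewrite author's own statement) =====
-- stated objective: alternative
-- what changed: B replaces A's nine independent heading searches plus index slicing by a single streaming pass: a two-track state machine (numbered-section mode and season mode) that routes each line into its bucket as it is read, never computing line indices or slices.
import Mathlib
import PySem

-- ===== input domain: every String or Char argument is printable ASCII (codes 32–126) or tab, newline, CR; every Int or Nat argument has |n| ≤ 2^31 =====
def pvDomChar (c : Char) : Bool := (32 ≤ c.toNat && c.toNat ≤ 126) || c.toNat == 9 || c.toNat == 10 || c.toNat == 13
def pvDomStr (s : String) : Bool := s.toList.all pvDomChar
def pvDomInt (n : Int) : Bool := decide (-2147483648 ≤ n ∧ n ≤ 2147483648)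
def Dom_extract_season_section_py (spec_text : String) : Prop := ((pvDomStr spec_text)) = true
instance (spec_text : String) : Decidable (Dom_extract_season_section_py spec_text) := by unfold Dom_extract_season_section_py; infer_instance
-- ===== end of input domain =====

-- B replaces A's nine separate heading searches plus slicing by ONE streaming pass (a two-track
-- state machine that routes each line into its bucket as it is read); return values proved equal on Pre_.

-- ===== PORT A =====
-- the _LOAD_SPEC_HEADINGS values the function uses
def pvHeadTerminology : String := "## 1) Terminology and Governance Semantics (Binding)"
def pvHeadRequiredInputs : String := "## 2) Required Inputs (Binding)"
def pvHeadPerWorkout : String := "## 3) Per-Workout Load Estimation (Binding)"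
def pvHeadWeeklyCorridor : String := "## 4) Weekly Corridor Derivation (Phase-Architect) (Binding)"
def pvHeadSeason : String := "### 5.1 Season-Planner"
def pvHeadPhase : String := "### 5.2 Phase-Architect"
def pvHeadEnd : String := "## End of LoadEstimationSpec v2.0"

-- Python 'x or y' on Optional[int]: None and 0 are falsy
def pvTruthyOr (a b : Option Int) : Option Int :=
  match a with
  | some v => if v ≠ 0 then some v else b
  | none => b

-- _find_heading: 'for idx, line in enumerate(lines): if line.strip() == heading: return idx'
def pvFindHeadingGo (heading : String) : List (Int × String) → Option Int
  | [] => none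
  | (i, l) :: rest =>
      if PySem.Str.strip l = heading then some i else pvFindHeadingGo heading rest

def pvFindHeading (lines : List String) (heading : String) : Option Int :=
  pvFindHeadingGo heading (PySem.List.enumerate lines)

-- _slice_by_indices
def pvSliceByIndices (lines : List String) (start? stop? : Option Int) : String :=
  match start? with
  | none => ""
  | some s =>
      let endIdx : Int := match stop? with | none => (lines.length : Int) | some e => e
      PySem.Str.rstrip (PySem.Str.join "\n" (PySem.List.slice lines (some s) (some endIdx)))

-- _load_spec_prelude
def pvLoadSpecPrelude (lines : List String) : String :=
  match pvFindHeading lines pvHeadTerminology with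
  | none => PySem.Str.rstrip (PySem.Str.join "\n" lines)
  | some i => PySem.Str.rstrip (PySem.Str.join "\n" (PySem.List.slice lines none (some i)))

def extract_season_section_py (spec_text : String) : String :=
  let lines := PySem.Str.splitlines spec_text
  let prelude := pvLoadSpecPrelude lines
  let terminology := pvSliceByIndices lines (pvFindHeading lines pvHeadTerminology)
      (pvFindHeading lines pvHeadRequiredInputs)
  let requiredInputs := pvSliceByIndices lines (pvFindHeading lines pvHeadRequiredInputs)
      (pvFindHeading lines pvHeadPerWorkout)
  let perWorkout := pvSliceByIndices lines (pvFindHeading lines pvHeadPerWorkout)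
      (pvFindHeading lines pvHeadWeeklyCorridor)
  let season := pvSliceByIndices lines (pvFindHeading lines pvHeadSeason)
      (pvTruthyOr (pvFindHeading lines pvHeadPhase) (pvFindHeading lines pvHeadEnd))
  let blocks := [prelude, terminology, requiredInputs, perWorkout, season].filter (fun b => b ≠ "")
  PySem.Str.strip (PySem.Str.join "\n\n" blocks)

-- ===== PORT B =====
-- the machine state: numbered-track mode, season-track mode, five buckets
structure PvSt where
  mode : Nat
  season : Nat
  b0 : List String
  b1 : List String
  b2 : List String
  b3 : List String
  b4 : List String
deriving Repr, DecidableEq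

-- one line of the streaming pass (Source B's loop body)
def pvStepB (st : PvSt) (line : String) : PvSt :=
  let s := PySem.Str.strip line
  let mode :=
    if st.mode = 0 ∧ s = pvHeadTerminology then 1
    else if st.mode = 1 ∧ s = pvHeadRequiredInputs then 2
    else if st.mode = 2 ∧ s = pvHeadPerWorkout then 3
    else if st.mode = 3 ∧ s = pvHeadWeeklyCorridor then 4
    else st.mode
  let season :=
    if st.season = 0 ∧ s = pvHeadSeason then 1
    else if st.season = 1 ∧ (s = pvHeadPhase ∨ s = pvHeadEnd) then 2
    else st.season
  { mode := mode, season := season,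
    b0 := if mode = 0 then st.b0 ++ [line] else st.b0,
    b1 := if mode = 1 then st.b1 ++ [line] else st.b1,
    b2 := if mode = 2 then st.b2 ++ [line] else st.b2,
    b3 := if mode = 3 then st.b3 ++ [line] else st.b3,
    b4 := if season = 1 then st.b4 ++ [line] else st.b4 }

def extract_season_section_py_alt (spec_text : String) : String :=
  let lines := PySem.Str.splitlines spec_text
  let st := lines.foldl pvStepB ⟨0, 0, [], [], [], [], []⟩
  let blocks := [st.b0, st.b1, st.b2, st.b3, st.b4].map
      (fun b => PySem.Str.rstrip (PySem.Str.join "\n" b))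
  PySem.Str.strip (PySem.Str.join "\n\n" (blocks.filter (fun b => b ≠ "")))

-- ===== PRECONDITION & SPEC =====
-- first line index whose strip equals the heading (used only to STATE the precondition)
def pvF (lines : List String) (h : String) : Option Nat :=
  lines.findIdx? (fun l => PySem.Str.strip l == h)

-- the condition itself, over the split lines
def pvPreLines (L : List String) : Prop :=
  (∀ r ∈ pvF L pvHeadRequiredInputs, ∃ t ∈ pvF L pvHeadTerminology, t < r) ∧
  (∀ p ∈ pvF L pvHeadPerWorkout, ∃ r ∈ pvF L pvHeadRequiredInputs, r < p) ∧
  (∀ p ∈ pvF L pvHeadPerWorkout, ∀ w ∈ pvF L pvHeadWeeklyCorridor, p < w) ∧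
  (∀ s ∈ pvF L pvHeadSeason, ∀ ph ∈ pvF L pvHeadPhase, s < ph) ∧
  (pvF L pvHeadPhase = none → ∀ s ∈ pvF L pvHeadSeason, ∀ e ∈ pvF L pvHeadEnd, s < e) ∧
  (∀ s ∈ pvF L pvHeadSeason, ∀ ph ∈ pvF L pvHeadPhase, ∀ i < ph, s < i →
    ∀ l ∈ L[i]?, ¬ (PySem.Str.strip l = pvHeadEnd))

-- Pre_ excludes spec texts whose recognised headings are missing their prerequisite section or occur
-- out of canonical order (or with a stray end-marker inside the season section): there A's seven
-- independent first-match slices overlap or go empty in accidental ways that no sequential reading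
-- of the document reproduces — a corner no caller of a spec extractor would specify.
def Pre_extract_season_section_py (spec_text : String) : Prop :=
  pvPreLines (PySem.Str.splitlines spec_text)

instance (spec_text : String) : Decidable (Pre_extract_season_section_py spec_text) := by
  unfold Pre_extract_season_section_py pvPreLines; infer_instance

def pvWitness_extract_season_section_py : String :=
  "intro text\n## 1) Terminology and Governance Semantics (Binding)\nterms\n### 5.1 Season-Planner\nseason body"

def Spec_extract_season_section_py (spec_text : String) (out : String) : Prop := out = extract_season_section_py_alt spec_text
instance (spec_text : String) (out : String) : Decidable (Spec_extract_season_section_py spec_text out) := by unfold Spec_extract_season_section_py; infer_instance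

-- ===== CLAIM (what is proved, stated in full; the proofs are below) =====
def Claim_equal_extract_season_section_py : Prop := ∀ (spec_text : String), Dom_extract_season_section_py spec_text → Pre_extract_season_section_py spec_text → Spec_extract_season_section_py spec_text (extract_season_section_py spec_text)

-- ===== LEMMAS AND PROOFS =====

-- ---- facts about pvF (first matching line index) ----

theorem pvF_some {L : List String} {h : String} {n : Nat} (hf : pvF L h = some n) :
    ∃ hn : n < L.length, PySem.Str.strip L[n] = h ∧
      ∀ j, j < n → ∀ hj : j < L.length, PySem.Str.strip L[j] ≠ h := by
  unfold pvF at hf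
  rw [List.findIdx?_eq_some_iff_findIdx_eq] at hf
  obtain ⟨hn, hidx⟩ := hf
  rw [List.findIdx_eq hn] at hidx
  refine ⟨hn, by simpa using hidx.1, ?_⟩
  intro j hjn hj
  have := hidx.2 j (by omega)
  simpa using this

theorem pvF_none {L : List String} {h : String} (hf : pvF L h = none) :
    ∀ x ∈ L, PySem.Str.strip x ≠ h := by
  unfold pvF at hf
  rw [List.findIdx?_eq_none_iff] at hf
  intro x hx
  have := hf x hx
  simpa using this

-- A's _find_heading equals pvF (cast to Int)
theorem pvFindHeadingGo_eq (h : String) (L : List String) (s : Int) :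
    pvFindHeadingGo h (PySem.List.enumerate L s) =
      (L.findIdx? (fun l => PySem.Str.strip l == h)).map (fun n => s + (n : Int)) := by
  induction L generalizing s with
  | nil => simp [pvFindHeadingGo, PySem.List.enumerate_nil]
  | cons x xs ih =>
    rw [PySem.List.enumerate_cons, List.findIdx?_cons]
    by_cases hx : PySem.Str.strip x = h
    · simp [pvFindHeadingGo, hx]
    · simp only [pvFindHeadingGo, hx, if_false, ih (s + 1), beq_iff_eq]
      cases L' : List.findIdx? (fun l => PySem.Str.strip l == h) xs with
      | none => simp
      | some n => simp; omega

theorem pvFindHeading_eq (L : List String) (h : String) :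
    pvFindHeading L h = (pvF L h).map (fun n => (n : Int)) := by
  unfold pvFindHeading pvF
  rw [pvFindHeadingGo_eq h L 0]
  cases List.findIdx? (fun l => PySem.Str.strip l == h) L <;> simp

-- ---- membership in a take/drop segment gives a position in L ----
theorem pv_mem_seg {L : List String} {a c : Nat} {x : String}
    (hx : x ∈ (L.drop a).take c) :
    ∃ j, a ≤ j ∧ j < a + c ∧ ∃ hj : j < L.length, L[j] = x := by
  rw [List.mem_take_iff_getElem] at hx
  obtain ⟨k, hk, hkx⟩ := hx
  have hk1 : k < c := lt_of_lt_of_le hk (min_le_left _ _)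
  have hk2 : k < (L.drop a).length := lt_of_lt_of_le hk (min_le_right _ _)
  have hlen : a + k < L.length := by
    have := List.length_drop (l := L) (i := a); omega
  refine ⟨a + k, by omega, by omega, hlen, ?_⟩
  rw [← hkx, List.getElem_drop]

-- decompose a drop at a later matched index
theorem pv_drop_decomp (L : List String) (a b : Nat) (hab : a ≤ b) (hb : b < L.length) :
    L.drop a = (L.drop a).take (b - a) ++ L[b] :: L.drop (b + 1) := by
  conv_lhs => rw [← List.take_append_drop (b - a) (L.drop a)]
  congr 1
  rw [List.drop_drop]
  have : a + (b - a) = b := by omega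
  rw [this, ← List.getElem_cons_drop hb]

-- a bounded segment, fronted by its first element
theorem pv_seg_cons {L : List String} {a b : Nat} (hab : a < b) (ha : a < L.length) :
    (L.drop a).take (b - a) = L[a] :: (L.drop (a + 1)).take (b - (a + 1)) := by
  rw [← List.getElem_cons_drop ha]
  have : b - a = (b - (a + 1)) + 1 := by omega
  rw [this, List.take_succ_cons]

-- ---- the two independent tracks of B's machine ----

-- numbered track: mode plus buckets 0-3
structure PvNum where
  mode : Nat
  c0 : List String
  c1 : List String
  c2 : List String
  c3 : List String
deriving Repr, DecidableEq

-- season track: season mode plus bucket 4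
structure PvSea where
  sm : Nat
  c4 : List String
deriving Repr, DecidableEq

def pvFM (m : Nat) (line : String) : Nat :=
  let s := PySem.Str.strip line
  if m = 0 ∧ s = pvHeadTerminology then 1
  else if m = 1 ∧ s = pvHeadRequiredInputs then 2
  else if m = 2 ∧ s = pvHeadPerWorkout then 3
  else if m = 3 ∧ s = pvHeadWeeklyCorridor then 4
  else m

def pvFS (sm : Nat) (line : String) : Nat :=
  let s := PySem.Str.strip line
  if sm = 0 ∧ s = pvHeadSeason then 1
  else if sm = 1 ∧ (s = pvHeadPhase ∨ s = pvHeadEnd) then 2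
  else sm

def pvNumStep (n : PvNum) (x : String) : PvNum :=
  let m := pvFM n.mode x
  ⟨m, if m = 0 then n.c0 ++ [x] else n.c0,
      if m = 1 then n.c1 ++ [x] else n.c1,
      if m = 2 then n.c2 ++ [x] else n.c2,
      if m = 3 then n.c3 ++ [x] else n.c3⟩

def pvSeaStep (s : PvSea) (x : String) : PvSea :=
  let sm := pvFS s.sm x
  ⟨sm, if sm = 1 then s.c4 ++ [x] else s.c4⟩

def pvProjN (st : PvSt) : PvNum := ⟨st.mode, st.b0, st.b1, st.b2, st.b3⟩
def pvProjS (st : PvSt) : PvSea := ⟨st.season, st.b4⟩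

theorem pv_foldB_projN (L : List String) (st : PvSt) :
    pvProjN (L.foldl pvStepB st) = L.foldl pvNumStep (pvProjN st) := by
  induction L generalizing st with
  | nil => rfl
  | cons x xs ih =>
    rw [List.foldl_cons, List.foldl_cons, ih]
    congr 1

theorem pv_foldB_projS (L : List String) (st : PvSt) :
    pvProjS (L.foldl pvStepB st) = L.foldl pvSeaStep (pvProjS st) := by
  induction L generalizing st with
  | nil => rfl
  | cons x xs ih =>
    rw [List.foldl_cons, List.foldl_cons, ih]
    congr 1

-- inert runs: no line triggers a transition from the current mode
theorem pvNum_run (L : List String) (n : PvNum)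
    (h : ∀ x ∈ L, pvFM n.mode x = n.mode) :
    L.foldl pvNumStep n =
      ⟨n.mode, n.c0 ++ (if n.mode = 0 then L else []),
               n.c1 ++ (if n.mode = 1 then L else []),
               n.c2 ++ (if n.mode = 2 then L else []),
               n.c3 ++ (if n.mode = 3 then L else [])⟩ := by
  induction L generalizing n with
  | nil => simp
  | cons x xs ih =>
    rw [List.foldl_cons]
    have hx := h x (by simp)
    have hrest : ∀ y ∈ xs, pvFM n.mode y = n.mode := fun y hy => h y (by simp [hy])
    rw [show pvNumStep n x = ⟨n.mode,
        if n.mode = 0 then n.c0 ++ [x] else n.c0,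
        if n.mode = 1 then n.c1 ++ [x] else n.c1,
        if n.mode = 2 then n.c2 ++ [x] else n.c2,
        if n.mode = 3 then n.c3 ++ [x] else n.c3⟩ by simp [pvNumStep, hx]]
    rw [ih _ (by exact hrest)]
    split_ifs <;> simp_all

theorem pvSea_run (L : List String) (s : PvSea)
    (h : ∀ x ∈ L, pvFS s.sm x = s.sm) :
    L.foldl pvSeaStep s = ⟨s.sm, s.c4 ++ (if s.sm = 1 then L else [])⟩ := by
  induction L generalizing s with
  | nil => simp
  | cons x xs ih =>
    rw [List.foldl_cons]
    have hx := h x (by simp)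
    have hrest : ∀ y ∈ xs, pvFS s.sm y = s.sm := fun y hy => h y (by simp [hy])
    rw [show pvSeaStep s x = ⟨s.sm, if s.sm = 1 then s.c4 ++ [x] else s.c4⟩ by
      simp [pvSeaStep, hx]]
    rw [ih _ (by exact hrest)]
    split_ifs <;> simp_all

-- trigger-free characterizations of the step functions
theorem pvFM_zero {x : String} (hx : PySem.Str.strip x ≠ pvHeadTerminology) : pvFM 0 x = 0 := by
  simp [pvFM, hx]
theorem pvFM_one {x : String} (hx : PySem.Str.strip x ≠ pvHeadRequiredInputs) : pvFM 1 x = 1 := by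
  simp [pvFM, hx]
theorem pvFM_two {x : String} (hx : PySem.Str.strip x ≠ pvHeadPerWorkout) : pvFM 2 x = 2 := by
  simp [pvFM, hx]
theorem pvFM_three {x : String} (hx : PySem.Str.strip x ≠ pvHeadWeeklyCorridor) : pvFM 3 x = 3 := by
  simp [pvFM, hx]
theorem pvFM_four (x : String) : pvFM 4 x = 4 := by simp [pvFM]
theorem pvFS_zero {x : String} (hx : PySem.Str.strip x ≠ pvHeadSeason) : pvFS 0 x = 0 := by
  simp [pvFS, hx]
theorem pvFS_one {x : String} (h1 : PySem.Str.strip x ≠ pvHeadPhase)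
    (h2 : PySem.Str.strip x ≠ pvHeadEnd) : pvFS 1 x = 1 := by
  simp [pvFS, h1, h2]
theorem pvFS_two (x : String) : pvFS 2 x = 2 := by simp [pvFS]

-- ---- trigger-freeness of segments from first-occurrence minimality ----
theorem pv_prefix_no {L : List String} {t : Nat} {H : String}
    (hmin : ∀ j, j < t → ∀ hj : j < L.length, PySem.Str.strip L[j] ≠ H) :
    ∀ x ∈ L.take t, PySem.Str.strip x ≠ H := by
  intro x hx
  rw [List.mem_take_iff_getElem] at hx
  obtain ⟨j, hj, rfl⟩ := hx
  exact hmin j (by omega) (by omega)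

theorem pv_seg_no {L : List String} {a b : Nat} {H : String} (hab : a ≤ b)
    (hmin : ∀ j, j < b → ∀ hj : j < L.length, PySem.Str.strip L[j] ≠ H) :
    ∀ x ∈ (L.drop a).take (b - a), PySem.Str.strip x ≠ H := by
  intro x hx
  obtain ⟨j, hja, hjb, hj, rfl⟩ := pv_mem_seg hx
  exact hmin j (by omega) hj

-- ---- A-side slice helpers ----
theorem pv_sliceA_bounded (L : List String) (a b : Nat) :
    pvSliceByIndices L (some (a : Int)) (some (b : Int)) =
      PySem.Str.rstrip (PySem.Str.join "\n" ((L.drop a).take (b - a))) := by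
  simp [pvSliceByIndices, PySem.List.slice_natCast]

theorem pv_sliceA_toEnd (L : List String) (a : Nat) :
    pvSliceByIndices L (some (a : Int)) none =
      PySem.Str.rstrip (PySem.Str.join "\n" (L.drop a)) := by
  show PySem.Str.rstrip (PySem.Str.join "\n"
      (PySem.List.slice L (some (a : Int)) (some (L.length : Int)))) = _
  rw [PySem.List.slice_natCast, List.take_of_length_le (by simp)]

theorem pv_empty_block : PySem.Str.rstrip (PySem.Str.join "\n" ([] : List String)) = "" := by
  decide

-- ---- numbered track: the four machine buckets equal A's four block strings ----
theorem pv_num_final (L : List String)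
    (h1 : ∀ r ∈ pvF L pvHeadRequiredInputs, ∃ t ∈ pvF L pvHeadTerminology, t < r)
    (h2 : ∀ p ∈ pvF L pvHeadPerWorkout, ∃ r ∈ pvF L pvHeadRequiredInputs, r < p)
    (h3 : ∀ p ∈ pvF L pvHeadPerWorkout, ∀ w ∈ pvF L pvHeadWeeklyCorridor, p < w) :
    pvLoadSpecPrelude L =
      PySem.Str.rstrip (PySem.Str.join "\n" (L.foldl pvNumStep ⟨0, [], [], [], []⟩).c0) ∧
    pvSliceByIndices L (pvFindHeading L pvHeadTerminology) (pvFindHeading L pvHeadRequiredInputs) =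
      PySem.Str.rstrip (PySem.Str.join "\n" (L.foldl pvNumStep ⟨0, [], [], [], []⟩).c1) ∧
    pvSliceByIndices L (pvFindHeading L pvHeadRequiredInputs) (pvFindHeading L pvHeadPerWorkout) =
      PySem.Str.rstrip (PySem.Str.join "\n" (L.foldl pvNumStep ⟨0, [], [], [], []⟩).c2) ∧
    pvSliceByIndices L (pvFindHeading L pvHeadPerWorkout) (pvFindHeading L pvHeadWeeklyCorridor) =
      PySem.Str.rstrip (PySem.Str.join "\n" (L.foldl pvNumStep ⟨0, [], [], [], []⟩).c3) := by
  rcases hT : pvF L pvHeadTerminology with _ | t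
  · -- terminology absent: by Pre_, required/per absent too; everything stays in the prelude
    have hR : pvF L pvHeadRequiredInputs = none := by
      cases hR' : pvF L pvHeadRequiredInputs with
      | none => rfl
      | some r =>
        obtain ⟨t', ht', _⟩ := h1 r (by simp [hR'])
        rw [hT] at ht'; simp at ht'
    have hP : pvF L pvHeadPerWorkout = none := by
      cases hP' : pvF L pvHeadPerWorkout with
      | none => rfl
      | some p =>
        obtain ⟨r', hr', _⟩ := h2 p (by simp [hP'])
        rw [hR] at hr'; simp at hr'
    have hnoT := pvF_none hT
    have hN : L.foldl pvNumStep ⟨0, [], [], [], []⟩ = ⟨0, L, [], [], []⟩ := by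
      rw [pvNum_run L ⟨0, [], [], [], []⟩ (fun x hx => pvFM_zero (hnoT x hx))]; simp
    rw [hN]
    refine ⟨?_, ?_, ?_, ?_⟩
    · simp [pvLoadSpecPrelude, pvFindHeading_eq, hT]
    · rw [pvFindHeading_eq, hT, pv_empty_block]; rfl
    · rw [pvFindHeading_eq, hR, pv_empty_block]; rfl
    · rw [pvFindHeading_eq, hP, pv_empty_block]; rfl
  · obtain ⟨ht, hstript, hmint⟩ := pvF_some hT
    have hsplitT : L = L.take t ++ (L[t] :: L.drop (t + 1)) := by
      rw [List.getElem_cons_drop ht]; exact (List.take_append_drop t L).symm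
    have hseg0 : (L.take t).foldl pvNumStep ⟨0, [], [], [], []⟩ = ⟨0, L.take t, [], [], []⟩ := by
      rw [pvNum_run (L.take t) ⟨0, [], [], [], []⟩ (fun x hx => pvFM_zero (pv_prefix_no hmint x hx))]; simp
    have e1 : pvNumStep ⟨0, L.take t, [], [], []⟩ L[t] = ⟨1, L.take t, [L[t]], [], []⟩ := by
      simp [pvNumStep, pvFM, hstript]
    have hprel : pvLoadSpecPrelude L = PySem.Str.rstrip (PySem.Str.join "\n" (L.take t)) := by
      simp [pvLoadSpecPrelude, pvFindHeading_eq, hT, PySem.List.slice_to_natCast]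
    rcases hR : pvF L pvHeadRequiredInputs with _ | r
    · -- required absent: by Pre_, per absent too; terminology runs to the end
      have hP : pvF L pvHeadPerWorkout = none := by
        cases hP' : pvF L pvHeadPerWorkout with
        | none => rfl
        | some p =>
          obtain ⟨r', hr', _⟩ := h2 p (by simp [hP'])
          rw [hR] at hr'; simp at hr'
      have hnoR := pvF_none hR
      have hN : L.foldl pvNumStep ⟨0, [], [], [], []⟩ = ⟨1, L.take t, L[t] :: L.drop (t + 1), [], []⟩ := by
        conv_lhs => rw [hsplitT]
        rw [List.foldl_append, hseg0, List.foldl_cons, e1,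
          pvNum_run (L.drop (t + 1)) ⟨1, L.take t, [L[t]], [], []⟩
            (fun x hx => pvFM_one (hnoR x (List.mem_of_mem_drop hx)))]
        simp
      rw [hN]
      refine ⟨hprel, ?_, ?_, ?_⟩
      · rw [pvFindHeading_eq, pvFindHeading_eq, hT, hR]
        show pvSliceByIndices L (some (t : Int)) none = _
        rw [pv_sliceA_toEnd, List.getElem_cons_drop ht]
      · rw [pvFindHeading_eq, hR, pv_empty_block]; rfl
      · rw [pvFindHeading_eq, hP, pv_empty_block]; rfl
    · obtain ⟨hr, hstripr, hminr⟩ := pvF_some hR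
      have htr : t < r := by
        obtain ⟨t', ht', hlt⟩ := h1 r (by simp [hR])
        rw [hT] at ht'; simp at ht'; omega
      have hsplitR : L.drop (t + 1) = (L.drop (t + 1)).take (r - (t + 1)) ++ (L[r] :: L.drop (r + 1)) := pv_drop_decomp L (t + 1) r (by omega) hr
      have hseg1 : ∀ x ∈ (L.drop (t + 1)).take (r - (t + 1)), pvFM 1 x = 1 :=
        fun x hx => pvFM_one (pv_seg_no (by omega) hminr x hx)
      have e2 : pvNumStep ⟨1, L.take t, L[t] :: (L.drop (t + 1)).take (r - (t + 1)), [], []⟩ L[r] =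
          ⟨2, L.take t, L[t] :: (L.drop (t + 1)).take (r - (t + 1)), [L[r]], []⟩ := by
        simp [pvNumStep, pvFM, hstripr]
      have hterm : pvSliceByIndices L (pvFindHeading L pvHeadTerminology) (pvFindHeading L pvHeadRequiredInputs) =
          PySem.Str.rstrip (PySem.Str.join "\n" (L[t] :: (L.drop (t + 1)).take (r - (t + 1)))) := by
        rw [pvFindHeading_eq, pvFindHeading_eq, hT, hR]
        show pvSliceByIndices L (some (t : Int)) (some (r : Int)) = _
        rw [pv_sliceA_bounded, pv_seg_cons htr ht]
      rcases hP : pvF L pvHeadPerWorkout with _ | p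
      · -- per-workout absent: required runs to the end
        have hnoP := pvF_none hP
        have hN : L.foldl pvNumStep ⟨0, [], [], [], []⟩ =
            ⟨2, L.take t, L[t] :: (L.drop (t + 1)).take (r - (t + 1)), L[r] :: L.drop (r + 1), []⟩ := by
          conv_lhs => rw [hsplitT]
          rw [List.foldl_append, hseg0, List.foldl_cons, e1]
          conv_lhs => rw [hsplitR]
          rw [List.foldl_append,
            pvNum_run ((L.drop (t + 1)).take (r - (t + 1))) ⟨1, L.take t, [L[t]], [], []⟩ hseg1]
          simp only [List.foldl_cons]
          simp [e2]
          rw [pvNum_run (L.drop (r + 1))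
              ⟨2, L.take t, L[t] :: (L.drop (t + 1)).take (r - (t + 1)), [L[r]], []⟩
              (fun x hx => pvFM_two (hnoP x (List.mem_of_mem_drop hx)))]
          simp
        rw [hN]
        refine ⟨hprel, hterm, ?_, ?_⟩
        · rw [pvFindHeading_eq, pvFindHeading_eq, hR, hP]
          show pvSliceByIndices L (some (r : Int)) none = _
          rw [pv_sliceA_toEnd, List.getElem_cons_drop hr]
        · rw [pvFindHeading_eq, hP, pv_empty_block]; rfl
      · obtain ⟨hp, hstripp, hminp⟩ := pvF_some hP
        have hrp : r < p := by
          obtain ⟨r', hr', hlt⟩ := h2 p (by simp [hP])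
          rw [hR] at hr'; simp at hr'; omega
        have hsplitP : L.drop (r + 1) = (L.drop (r + 1)).take (p - (r + 1)) ++ (L[p] :: L.drop (p + 1)) := pv_drop_decomp L (r + 1) p (by omega) hp
        have hseg2 : ∀ x ∈ (L.drop (r + 1)).take (p - (r + 1)), pvFM 2 x = 2 :=
          fun x hx => pvFM_two (pv_seg_no (by omega) hminp x hx)
        have e3 : pvNumStep ⟨2, L.take t, L[t] :: (L.drop (t + 1)).take (r - (t + 1)), L[r] :: (L.drop (r + 1)).take (p - (r + 1)), []⟩ L[p] =
            ⟨3, L.take t, L[t] :: (L.drop (t + 1)).take (r - (t + 1)), L[r] :: (L.drop (r + 1)).take (p - (r + 1)), [L[p]]⟩ := by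
          simp [pvNumStep, pvFM, hstripp]
        have hreq : pvSliceByIndices L (pvFindHeading L pvHeadRequiredInputs) (pvFindHeading L pvHeadPerWorkout) =
            PySem.Str.rstrip (PySem.Str.join "\n" (L[r] :: (L.drop (r + 1)).take (p - (r + 1)))) := by
          rw [pvFindHeading_eq, pvFindHeading_eq, hR, hP]
          show pvSliceByIndices L (some (r : Int)) (some (p : Int)) = _
          rw [pv_sliceA_bounded, pv_seg_cons hrp hr]
        have hupto2 : ((L.take t ++ (L[t] :: ((L.drop (t+1)).take (r-(t+1)) ++ (L[r] :: L.drop (r+1))))).foldl pvNumStep ⟨0, [], [], [], []⟩) =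
            (L.drop (r+1)).foldl pvNumStep ⟨2, L.take t, L[t] :: (L.drop (t + 1)).take (r - (t + 1)), [L[r]], []⟩ := by
          rw [List.foldl_append, hseg0, List.foldl_cons, e1, List.foldl_append,
            pvNum_run ((L.drop (t + 1)).take (r - (t + 1))) ⟨1, L.take t, [L[t]], [], []⟩ hseg1]
          simp only [List.foldl_cons]
          simp [e2]
        have hbase : L.foldl pvNumStep ⟨0, [], [], [], []⟩ =
            (L.drop (r + 1)).foldl pvNumStep ⟨2, L.take t, L[t] :: (L.drop (t + 1)).take (r - (t + 1)), [L[r]], []⟩ := by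
          conv_lhs => rw [hsplitT, hsplitR]
          exact hupto2
        rcases hW : pvF L pvHeadWeeklyCorridor with _ | w
        · -- weekly-corridor absent: per-workout runs to the end
          have hnoW := pvF_none hW
          have hN : L.foldl pvNumStep ⟨0, [], [], [], []⟩ =
              ⟨3, L.take t, L[t] :: (L.drop (t + 1)).take (r - (t + 1)), L[r] :: (L.drop (r + 1)).take (p - (r + 1)), L[p] :: L.drop (p + 1)⟩ := by
            rw [hbase]
            conv_lhs => rw [hsplitP]
            rw [List.foldl_append,
              pvNum_run ((L.drop (r + 1)).take (p - (r + 1))) ⟨2, L.take t, L[t] :: (L.drop (t + 1)).take (r - (t + 1)), [L[r]], []⟩ hseg2]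
            simp only [List.foldl_cons]
            simp [e3]
            rw [pvNum_run (L.drop (p + 1)) ⟨3, L.take t, L[t] :: (L.drop (t + 1)).take (r - (t + 1)), L[r] :: (L.drop (r + 1)).take (p - (r + 1)), [L[p]]⟩
              (fun x hx => pvFM_three (hnoW x (List.mem_of_mem_drop hx)))]
            simp
          rw [hN]
          refine ⟨hprel, hterm, hreq, ?_⟩
          rw [pvFindHeading_eq, pvFindHeading_eq, hP, hW]
          show pvSliceByIndices L (some (p : Int)) none = _
          rw [pv_sliceA_toEnd, List.getElem_cons_drop hp]
        · obtain ⟨hw, hstripw, hminw⟩ := pvF_some hW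
          have hpw : p < w := h3 p (by simp [hP]) w (by simp [hW])
          have hsplitW : L.drop (p + 1) = (L.drop (p + 1)).take (w - (p + 1)) ++ (L[w] :: L.drop (w + 1)) := pv_drop_decomp L (p + 1) w (by omega) hw
          have hseg3 : ∀ x ∈ (L.drop (p + 1)).take (w - (p + 1)), pvFM 3 x = 3 :=
            fun x hx => pvFM_three (pv_seg_no (by omega) hminw x hx)
          have e4 : pvNumStep ⟨3, L.take t, L[t] :: (L.drop (t + 1)).take (r - (t + 1)), L[r] :: (L.drop (r + 1)).take (p - (r + 1)), L[p] :: (L.drop (p + 1)).take (w - (p + 1))⟩ L[w] =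
              ⟨4, L.take t, L[t] :: (L.drop (t + 1)).take (r - (t + 1)), L[r] :: (L.drop (r + 1)).take (p - (r + 1)), L[p] :: (L.drop (p + 1)).take (w - (p + 1))⟩ := by
            simp [pvNumStep, pvFM, hstripw]
          have hN : L.foldl pvNumStep ⟨0, [], [], [], []⟩ =
              ⟨4, L.take t, L[t] :: (L.drop (t + 1)).take (r - (t + 1)), L[r] :: (L.drop (r + 1)).take (p - (r + 1)), L[p] :: (L.drop (p + 1)).take (w - (p + 1))⟩ := by
            rw [hbase]
            conv_lhs => rw [hsplitP]
            rw [List.foldl_append,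
              pvNum_run ((L.drop (r + 1)).take (p - (r + 1))) ⟨2, L.take t, L[t] :: (L.drop (t + 1)).take (r - (t + 1)), [L[r]], []⟩ hseg2]
            simp only [List.foldl_cons]
            simp [e3]
            conv_lhs => rw [hsplitW]
            rw [List.foldl_append,
              pvNum_run ((L.drop (p + 1)).take (w - (p + 1))) ⟨3, L.take t, L[t] :: (L.drop (t + 1)).take (r - (t + 1)), L[r] :: (L.drop (r + 1)).take (p - (r + 1)), [L[p]]⟩ hseg3]
            simp only [List.foldl_cons]
            simp [e4]
            rw [pvNum_run (L.drop (w + 1)) ⟨4, L.take t, L[t] :: (L.drop (t + 1)).take (r - (t + 1)), L[r] :: (L.drop (r + 1)).take (p - (r + 1)), L[p] :: (L.drop (p + 1)).take (w - (p + 1))⟩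
              (fun x _ => pvFM_four x)]
            simp
          rw [hN]
          refine ⟨hprel, hterm, hreq, ?_⟩
          rw [pvFindHeading_eq, pvFindHeading_eq, hP, hW]
          show pvSliceByIndices L (some (p : Int)) (some (w : Int)) = _
          rw [pv_sliceA_bounded, pv_seg_cons hpw hp]


-- ---- season track: the machine's season bucket equals A's season block string ----
theorem pv_sea_final (L : List String)
    (h4 : ∀ s ∈ pvF L pvHeadSeason, ∀ ph ∈ pvF L pvHeadPhase, s < ph)
    (h5 : pvF L pvHeadPhase = none → ∀ s ∈ pvF L pvHeadSeason, ∀ e ∈ pvF L pvHeadEnd, s < e)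
    (h6 : ∀ s ∈ pvF L pvHeadSeason, ∀ ph ∈ pvF L pvHeadPhase, ∀ i < ph, s < i →
      ∀ l ∈ L[i]?, ¬ (PySem.Str.strip l = pvHeadEnd)) :
    pvSliceByIndices L (pvFindHeading L pvHeadSeason)
        (pvTruthyOr (pvFindHeading L pvHeadPhase) (pvFindHeading L pvHeadEnd)) =
      PySem.Str.rstrip (PySem.Str.join "\n" (L.foldl pvSeaStep ⟨0, []⟩).c4) := by
  rcases hS : pvF L pvHeadSeason with _ | sv
  · -- 5.1 heading absent: the season bucket stays empty, A's slice start is None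
    have hN : L.foldl pvSeaStep ⟨0, []⟩ = ⟨0, []⟩ := by
      rw [pvSea_run L ⟨0, []⟩ (fun x hx => pvFS_zero (pvF_none hS x hx))]; simp
    rw [hN, pvFindHeading_eq, hS, pv_empty_block]
    rfl
  · obtain ⟨hs, hstrips, hmins⟩ := pvF_some hS
    have hsplitS : L = L.take sv ++ (L[sv] :: L.drop (sv + 1)) := by
      rw [List.getElem_cons_drop hs]; exact (List.take_append_drop sv L).symm
    have hseg0 : (L.take sv).foldl pvSeaStep ⟨0, []⟩ = ⟨0, []⟩ := by
      rw [pvSea_run (L.take sv) ⟨0, []⟩ (fun x hx => pvFS_zero (pv_prefix_no hmins x hx))]; simp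
    have e1 : pvSeaStep ⟨0, []⟩ L[sv] = ⟨1, [L[sv]]⟩ := by
      simp [pvSeaStep, pvFS, hstrips]
    rcases hPh : pvF L pvHeadPhase with _ | ph
    · have hnoPh := pvF_none hPh
      rcases hE : pvF L pvHeadEnd with _ | ev
      · -- neither 5.2 nor the end marker occur: collect to the end of the file
        have hnoE := pvF_none hE
        have hN : L.foldl pvSeaStep ⟨0, []⟩ = ⟨1, L[sv] :: L.drop (sv + 1)⟩ := by
          conv_lhs => rw [hsplitS]
          rw [List.foldl_append, hseg0, List.foldl_cons, e1,
            pvSea_run (L.drop (sv + 1)) ⟨1, [L[sv]]⟩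
              (fun x hx => pvFS_one (hnoPh x (List.mem_of_mem_drop hx)) (hnoE x (List.mem_of_mem_drop hx)))]
          simp
        rw [hN, pvFindHeading_eq, pvFindHeading_eq, pvFindHeading_eq, hS, hPh, hE]
        show pvSliceByIndices L (some (sv : Int)) none = _
        rw [pv_sliceA_toEnd, List.getElem_cons_drop hs]
      · -- no 5.2, but an end marker: it closes the season section
        obtain ⟨he, hstripe, hmine⟩ := pvF_some hE
        have hse : sv < ev := h5 hPh sv (by simp [hS]) ev (by simp [hE])
        have hsplitE : L.drop (sv + 1) = (L.drop (sv + 1)).take (ev - (sv + 1)) ++ (L[ev] :: L.drop (ev + 1)) := pv_drop_decomp L (sv + 1) ev (by omega) he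
        have hsegE : ∀ x ∈ (L.drop (sv + 1)).take (ev - (sv + 1)), pvFS 1 x = 1 :=
          fun x hx => pvFS_one (hnoPh x (List.mem_of_mem_drop (List.mem_of_mem_take hx)))
            (pv_seg_no (by omega) hmine x hx)
        have e2 : pvSeaStep ⟨1, L[sv] :: (L.drop (sv + 1)).take (ev - (sv + 1))⟩ L[ev] =
            ⟨2, L[sv] :: (L.drop (sv + 1)).take (ev - (sv + 1))⟩ := by
          simp [pvSeaStep, pvFS, hstripe]
        have hN : L.foldl pvSeaStep ⟨0, []⟩ = ⟨2, L[sv] :: (L.drop (sv + 1)).take (ev - (sv + 1))⟩ := by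
          conv_lhs => rw [hsplitS]
          rw [List.foldl_append, hseg0, List.foldl_cons, e1]
          conv_lhs => rw [hsplitE]
          rw [List.foldl_append, pvSea_run ((L.drop (sv + 1)).take (ev - (sv + 1))) ⟨1, [L[sv]]⟩ hsegE]
          simp only [List.foldl_cons]
          simp [e2]
          rw [pvSea_run (L.drop (ev + 1)) ⟨2, L[sv] :: (L.drop (sv + 1)).take (ev - (sv + 1))⟩
            (fun x _ => pvFS_two x)]
          simp
        rw [hN, pvFindHeading_eq, pvFindHeading_eq, pvFindHeading_eq, hS, hPh, hE]
        show pvSliceByIndices L (some (sv : Int)) (some (ev : Int)) = _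
        rw [pv_sliceA_bounded, pv_seg_cons hse hs]
    · -- 5.2 present: it closes the season section (the truthy 'or' picks it)
      obtain ⟨hph, hstripph, hminph⟩ := pvF_some hPh
      have hsph : sv < ph := h4 sv (by simp [hS]) ph (by simp [hPh])
      have hsplitPh : L.drop (sv + 1) = (L.drop (sv + 1)).take (ph - (sv + 1)) ++ (L[ph] :: L.drop (ph + 1)) := pv_drop_decomp L (sv + 1) ph (by omega) hph
      have hsegPh : ∀ x ∈ (L.drop (sv + 1)).take (ph - (sv + 1)), pvFS 1 x = 1 := by
        intro x hx
        obtain ⟨j, hja, hjb, hj, rfl⟩ := pv_mem_seg hx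
        refine pvFS_one (hminph j (by omega) hj) ?_
        exact h6 sv (by simp [hS]) ph (by simp [hPh]) j (by omega) (by omega) L[j]
          (by simp [List.getElem?_eq_getElem hj])
      have e2 : pvSeaStep ⟨1, L[sv] :: (L.drop (sv + 1)).take (ph - (sv + 1))⟩ L[ph] =
          ⟨2, L[sv] :: (L.drop (sv + 1)).take (ph - (sv + 1))⟩ := by
        simp [pvSeaStep, pvFS, hstripph]
      have hN : L.foldl pvSeaStep ⟨0, []⟩ = ⟨2, L[sv] :: (L.drop (sv + 1)).take (ph - (sv + 1))⟩ := by
        conv_lhs => rw [hsplitS]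
        rw [List.foldl_append, hseg0, List.foldl_cons, e1]
        conv_lhs => rw [hsplitPh]
        rw [List.foldl_append, pvSea_run ((L.drop (sv + 1)).take (ph - (sv + 1))) ⟨1, [L[sv]]⟩ hsegPh]
        simp only [List.foldl_cons]
        simp [e2]
        rw [pvSea_run (L.drop (ph + 1)) ⟨2, L[sv] :: (L.drop (sv + 1)).take (ph - (sv + 1))⟩
          (fun x _ => pvFS_two x)]
        simp
      have hphne : ((ph : Int) ≠ 0) := by omega
      have htr : pvTruthyOr (some (ph : Int)) (pvFindHeading L pvHeadEnd) = some (ph : Int) := by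
        simp only [pvTruthyOr, ne_eq, ite_not, ite_eq_right_iff]
        intro h0; exact absurd h0 hphne
      rw [hN, pvFindHeading_eq, pvFindHeading_eq, hS, hPh]
      show pvSliceByIndices L (some (sv : Int)) (pvTruthyOr (some ((ph : Nat) : Int)) (pvFindHeading L pvHeadEnd)) = _
      rw [htr, pv_sliceA_bounded, pv_seg_cons hsph hs]

-- ===== VERDICT (by name: the statement is the Claim_ definition above) =====
theorem extract_season_section_py_spec : Claim_equal_extract_season_section_py := by
  intro spec_text _ hpre
  unfold Pre_extract_season_section_py pvPreLines at hpre
  obtain ⟨h1, h2, h3, h4, h5, h6⟩ := hpre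
  unfold Spec_extract_season_section_py extract_season_section_py extract_season_section_py_alt
  set L := PySem.Str.splitlines spec_text with hL
  obtain ⟨hA0, hA1, hA2, hA3⟩ := pv_num_final L h1 h2 h3
  have hA4 := pv_sea_final L h4 h5 h6
  have hN := pv_foldB_projN L ⟨0, 0, [], [], [], [], []⟩
  have hS := pv_foldB_projS L ⟨0, 0, [], [], [], [], []⟩
  have hb0 : (L.foldl pvStepB ⟨0, 0, [], [], [], [], []⟩).b0 = (L.foldl pvNumStep ⟨0, [], [], [], []⟩).c0 := congrArg PvNum.c0 hN
  have hb1 : (L.foldl pvStepB ⟨0, 0, [], [], [], [], []⟩).b1 = (L.foldl pvNumStep ⟨0, [], [], [], []⟩).c1 := congrArg PvNum.c1 hN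
  have hb2 : (L.foldl pvStepB ⟨0, 0, [], [], [], [], []⟩).b2 = (L.foldl pvNumStep ⟨0, [], [], [], []⟩).c2 := congrArg PvNum.c2 hN
  have hb3 : (L.foldl pvStepB ⟨0, 0, [], [], [], [], []⟩).b3 = (L.foldl pvNumStep ⟨0, [], [], [], []⟩).c3 := congrArg PvNum.c3 hN
  have hb4 : (L.foldl pvStepB ⟨0, 0, [], [], [], [], []⟩).b4 = (L.foldl pvSeaStep ⟨0, []⟩).c4 := congrArg PvSea.c4 hS
  simp only [List.map_cons, List.map_nil, hb0, hb1, hb2, hb3, hb4]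
  rw [hA0, hA1, hA2, hA3, hA4]
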